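-- pv_equiv track=rewrite | github.com/belovmd/it-academy-python-spring | src/Homework2/digit_neighbor_sum.py | digit_neighbor_sum
-- ===== SOURCE A (Python) =====
-- def digit_neighbor_sum(str_digits):
--     lst = list(map(int, str_digits.split()))
--     if len(lst) <= 1:
--         return str_digits
--     sum_list = list()
--     for ind, _ in enumerate(lst):
--         if (ind + 1) < len(lst):
--             sum_list.append(lst[ind - 1] + lst[ind + 1])
--         else:
--             sum_list.append(lst[ind - 1] + lst[0])
--     return ' '.join(list(map(str, sum_list)))
-- ===== SOURCE B (Python) =====
-- def digit_neighbor_sum(str_digits):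
--     lst = [int(t) for t in str_digits.split()]
--     if len(lst) <= 1:
--         return str_digits
--     prev = lst[-1:] + lst[:-1]   # left cyclic neighbour of each position
--     nxt = lst[1:] + lst[:1]      # right cyclic neighbour of each position
--     return ' '.join(str(p + n) for p, n in zip(prev, nxt))
-- ===== Notes on version B (the rewrite author's own statement) =====
-- stated objective: idiomatic
-- what changed: Replaces the per-index loop with its branch on ind+1<len and negative-index wraparound by two whole-list cyclic rotations (slices) combined positionally with zip.
import Mathlib
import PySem

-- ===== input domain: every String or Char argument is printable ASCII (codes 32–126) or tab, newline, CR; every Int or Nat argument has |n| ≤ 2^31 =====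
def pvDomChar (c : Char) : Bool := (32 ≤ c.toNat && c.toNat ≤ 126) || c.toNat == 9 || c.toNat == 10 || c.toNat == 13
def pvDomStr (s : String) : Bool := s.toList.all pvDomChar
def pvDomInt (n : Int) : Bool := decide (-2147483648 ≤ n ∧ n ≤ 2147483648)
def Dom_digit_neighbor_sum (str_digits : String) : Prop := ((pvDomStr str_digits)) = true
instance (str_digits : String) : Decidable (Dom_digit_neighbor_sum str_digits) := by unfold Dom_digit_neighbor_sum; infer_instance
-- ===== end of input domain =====

-- B replaces A's per-index loop (branch on ind+1<len, negative-index wrap) by two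
-- cyclic rotations combined with zip; same cost, more idiomatic.

-- ===== PORT A =====
def digit_neighbor_sum (str_digits : String) : String :=
  match (PySem.Str.split₀ str_digits).mapM PySem.Int.ofStr? with
  | none => ""   -- int() raises ValueError here; excluded by Pre_
  | some lst =>
    if lst.length ≤ 1 then str_digits
    else
      let sum_list := (PySem.List.enumerate lst 0).foldl (fun acc p =>
        if p.1 + 1 < (lst.length : Int) then
          acc ++ [PySem.List.pyGetD lst (p.1 - 1) 0 + PySem.List.pyGetD lst (p.1 + 1) 0]
        else
          acc ++ [PySem.List.pyGetD lst (p.1 - 1) 0 + PySem.List.pyGetD lst 0 0]) []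
      PySem.Str.join " " (sum_list.map PySem.Int.toStr)

-- ===== PORT B =====
def digit_neighbor_sum_alt (str_digits : String) : String :=
  match (PySem.Str.split₀ str_digits).mapM PySem.Int.ofStr? with
  | none => ""   -- int() raises ValueError here; excluded by Pre_
  | some lst =>
    if lst.length ≤ 1 then str_digits
    else
      let prev := PySem.List.slice lst (some (-1)) none ++ PySem.List.slice lst none (some (-1))
      let nxt := PySem.List.slice lst (some 1) none ++ PySem.List.slice lst none (some 1)
      PySem.Str.join " " ((List.zipWith (· + ·) prev nxt).map PySem.Int.toStr)

-- ===== PRECONDITION & SPEC =====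
-- Pre_ excludes exactly the inputs where int() raises ValueError (a non-int token).
def Pre_digit_neighbor_sum (str_digits : String) : Prop :=
  ∀ t ∈ PySem.Str.split₀ str_digits, (PySem.Int.ofStr? t).isSome
instance (str_digits : String) : Decidable (Pre_digit_neighbor_sum str_digits) := by
  unfold Pre_digit_neighbor_sum; infer_instance
def pvWitness_digit_neighbor_sum : String := "1 2 3"

def Spec_digit_neighbor_sum (str_digits : String) (out : String) : Prop := out = digit_neighbor_sum_alt str_digits
instance (str_digits : String) (out : String) : Decidable (Spec_digit_neighbor_sum str_digits out) := by unfold Spec_digit_neighbor_sum; infer_instance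

-- ===== CLAIM (what is proved, stated in full; the proofs are below) =====
def Claim_equal_digit_neighbor_sum : Prop := ∀ (str_digits : String), Dom_digit_neighbor_sum str_digits → Pre_digit_neighbor_sum str_digits → Spec_digit_neighbor_sum str_digits (digit_neighbor_sum str_digits)

-- ===== LEMMAS AND PROOFS =====

-- A's loop body as a per-element map function
def pvG (lst : List Int) (p : Int × Int) : Int :=
  if p.1 + 1 < (lst.length : Int) then
    PySem.List.pyGetD lst (p.1 - 1) 0 + PySem.List.pyGetD lst (p.1 + 1) 0
  else
    PySem.List.pyGetD lst (p.1 - 1) 0 + PySem.List.pyGetD lst 0 0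

lemma pv_core (lst : List Int) (h2 : 2 ≤ lst.length) :
    (PySem.List.enumerate lst 0).map (pvG lst) =
      List.zipWith (· + ·)
        (PySem.List.slice lst (some (-1)) none ++ PySem.List.slice lst none (some (-1)))
        (PySem.List.slice lst (some 1) none ++ PySem.List.slice lst none (some 1)) := by
  have hne : lst ≠ [] := by intro h; simp [h] at h2
  rw [PySem.List.slice_from_neg_one, PySem.List.slice_to_neg_one,
      PySem.List.slice_from_one]
  have h1 : PySem.List.slice lst none (some 1) = lst.take 1 := by
    have := PySem.List.slice_to_natCast (xs := lst) (b := 1)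
    simpa using this
  rw [h1]
  apply List.ext_getElem
  · simp [PySem.List.length_enumerate]
    omega
  · intro i hi hj
    simp [PySem.List.length_enumerate] at hi
    rw [List.getElem_map, PySem.List.getElem_enumerate]
    have hlen1 : (lst.drop (lst.length - 1) ++ lst.dropLast).length = lst.length := by
      simp
    have hlen2 : (lst.tail ++ lst.take 1).length = lst.length := by
      simp; omega
    rw [List.getElem_zipWith]
    -- left operand
    have hprev : (lst.drop (lst.length - 1) ++ lst.dropLast)[i]'(by omega) =
        PySem.List.pyGetD lst ((0 : Int) + (i : Int) - 1) 0 := by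
      by_cases hi0 : i = 0
      · subst hi0
        rw [List.getElem_append_left (by simp only [List.length_drop]; omega)]
        rw [List.getElem_drop]
        have h0 : (0 : Int) + ((0 : Nat) : Int) - 1 = -1 := by simp
        rw [h0, PySem.List.pyGetD_neg_one (h := hne)]
        rw [List.getLast_eq_getElem]
        simp
      · have hi1 : 1 ≤ i := Nat.one_le_iff_ne_zero.mpr hi0
        have hdl : (lst.drop (lst.length - 1)).length = 1 := by simp; omega
        rw [List.getElem_append_right (by omega)]
        have : (0 : Int) + (i : Int) - 1 = ((i - 1 : Nat) : Int) := by
          push_cast [hi1]; ring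
        rw [this, PySem.List.pyGetD_natCast]
        rw [List.getElem_dropLast]
        rw [List.getD_eq_getElem _ _ (by omega)]
        simp [hdl]
    -- right operand
    have hnxt : (lst.tail ++ lst.take 1)[i]'(by omega) =
        (if (0 : Int) + (i : Int) + 1 < (lst.length : Int) then
          PySem.List.pyGetD lst ((0 : Int) + (i : Int) + 1) 0
        else PySem.List.pyGetD lst 0 0) := by
      by_cases hlast : i + 1 < lst.length
      · rw [if_pos (by omega)]
        have : (0 : Int) + (i : Int) + 1 = ((i + 1 : Nat) : Int) := by push_cast; ring
        rw [this, PySem.List.pyGetD_natCast]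
        rw [List.getElem_append_left (by simp; omega)]
        rw [List.getElem_tail, List.getD_eq_getElem _ _ (by omega)]
      · rw [if_neg (by omega)]
        have h0 : PySem.List.pyGetD lst 0 0 = lst[0]'(by omega) := by
          rw [PySem.List.pyGetD_zero, List.getD_eq_getElem _ _ (by omega)]
        rw [h0]
        rw [List.getElem_append_right (by simp only [List.length_tail]; omega)]
        have hiz : i - (lst.length - 1) = 0 := by omega
        simp [hiz]
    rw [hprev, hnxt]
    unfold pvG
    dsimp only
    split_ifs <;> rfl

-- A's foldl is a map of pvG
lemma pv_fold (lst : List Int) :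
    (PySem.List.enumerate lst 0).foldl (fun acc p =>
        if p.1 + 1 < (lst.length : Int) then
          acc ++ [PySem.List.pyGetD lst (p.1 - 1) 0 + PySem.List.pyGetD lst (p.1 + 1) 0]
        else
          acc ++ [PySem.List.pyGetD lst (p.1 - 1) 0 + PySem.List.pyGetD lst 0 0]) [] =
      (PySem.List.enumerate lst 0).map (pvG lst) := by
  have hfun : (fun (acc : List Int) (p : Int × Int) =>
        if p.1 + 1 < (lst.length : Int) then
          acc ++ [PySem.List.pyGetD lst (p.1 - 1) 0 + PySem.List.pyGetD lst (p.1 + 1) 0]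
        else
          acc ++ [PySem.List.pyGetD lst (p.1 - 1) 0 + PySem.List.pyGetD lst 0 0]) =
      fun acc p => acc ++ [pvG lst p] := by
    funext acc p
    unfold pvG
    split_ifs <;> rfl
  rw [hfun, PySem.List.foldl_append_singleton_eq_map]
  simp

-- ===== VERDICT (by name: the statement is the Claim_ definition above) =====
theorem digit_neighbor_sum_spec : Claim_equal_digit_neighbor_sum := by
  intro s _ _
  unfold Spec_digit_neighbor_sum digit_neighbor_sum digit_neighbor_sum_alt
  cases h : (PySem.Str.split₀ s).mapM PySem.Int.ofStr? with
  | none => rfl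
  | some lst =>
    by_cases hlen : lst.length ≤ 1
    · simp [hlen]
    · simp only [hlen, if_false]
      rw [pv_fold, pv_core lst (by omega)]
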